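-- pv_equiv track=rewrite | github.com/equalitie/baskervillehall | src/baskervillehall/baskervillehall_isolation_forest.py | is_asset_only_session
-- ===== SOURCE A (Python) =====
-- def is_asset_only_session(session):
--     requests = session['requests']
--     asset_mime_types = {'image/', 'text/css', 'application/javascript'}
--     non_asset_types = {'text/html', 'application/json'}
--
--     seen_asset = False
--     for r in requests:
--         ct = r.get('type', '')
--         if any(ct.startswith(asset) for asset in asset_mime_types):
--             seen_asset = True
--         elif any(ct.startswith(nt) for nt in non_asset_types):
--             return False  # this is a real content request
--
--     return seen_asset
-- ===== SOURCE B (Python) =====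
-- def is_asset_only_session(session):
--     requests = session['requests']
--     asset_mime_types = ('image/', 'text/css', 'application/javascript')
--     non_asset_types = ('text/html', 'application/json')
--     types = [r.get('type', '') for r in requests]
--     has_asset = any(ct.startswith(a) for ct in types for a in asset_mime_types)
--     has_non_asset = any(ct.startswith(n) for ct in types for n in non_asset_types)
--     return has_asset and not has_non_asset
-- ===== Notes on version B (the rewrite author's own statement) =====
-- stated objective: simpler
-- what changed: Replaces the stateful early-exit loop (seen_asset flag plus mid-loop return) with a stateless boolean formula over two independent any() scans of the request types; correct because the asset and non-asset prefix sets are disjoint, so the if/elif ordering never matters.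
import Mathlib
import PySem

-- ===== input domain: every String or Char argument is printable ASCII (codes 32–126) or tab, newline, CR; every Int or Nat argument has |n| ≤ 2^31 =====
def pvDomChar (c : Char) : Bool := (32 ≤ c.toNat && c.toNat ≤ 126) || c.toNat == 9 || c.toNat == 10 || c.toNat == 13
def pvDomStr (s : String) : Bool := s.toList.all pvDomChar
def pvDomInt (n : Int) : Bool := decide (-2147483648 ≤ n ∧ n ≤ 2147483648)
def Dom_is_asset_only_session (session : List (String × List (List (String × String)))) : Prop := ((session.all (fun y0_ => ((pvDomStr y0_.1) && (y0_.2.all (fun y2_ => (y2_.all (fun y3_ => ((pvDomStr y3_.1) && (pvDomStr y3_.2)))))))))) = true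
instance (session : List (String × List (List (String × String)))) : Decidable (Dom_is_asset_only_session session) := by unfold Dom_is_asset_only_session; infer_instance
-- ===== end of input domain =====

-- B replaces A's stateful early-exit loop by a stateless boolean formula over two independent
-- scans of the request types (valid because the asset and non-asset prefix sets are disjoint).


-- first-match association-list lookup: exact model of Python dict lookup (d[k] / d.get(k, dflt))
def pvGet? {v : Type} : List (String × v) → String → Option v
  | [], _ => none
  | (k, x) :: rest, key => if k == key then some x else pvGet? rest key

def pvGetD {v : Type} (d : List (String × v)) (key : String) (dflt : v) : v :=
  (pvGet? d key).getD dflt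

-- ===== PORT A =====
-- the two Python set literals (result of any() over a set does not depend on iteration order)
def pvAssetSet : PySem.Set String := PySem.Set.ofList ["image/", "text/css", "application/javascript"]
def pvNonAssetSet : PySem.Set String := PySem.Set.ofList ["text/html", "application/json"]

-- A's for-loop with the seen_asset accumulator and the early 'return False'
def pvALoop : List (List (String × String)) → Bool → Bool
  | [], seen_asset => seen_asset
  | r :: rest, seen_asset =>
    let ct := pvGetD r "type" ""
    if pvAssetSet.any (fun asset => PySem.Str.startswith ct asset) then
      pvALoop rest true
    else if pvNonAssetSet.any (fun nt => PySem.Str.startswith ct nt) then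
      false
    else
      pvALoop rest seen_asset

def is_asset_only_session (session : List (String × List (List (String × String)))) : Bool :=
  let requests := (pvGet? session "requests").getD []   -- Pre_ guarantees the key exists
  pvALoop requests false

-- ===== PORT B =====
def pvAssetTuple : List String := ["image/", "text/css", "application/javascript"]
def pvNonAssetTuple : List String := ["text/html", "application/json"]

def is_asset_only_session_alt (session : List (String × List (List (String × String)))) : Bool :=
  let requests := (pvGet? session "requests").getD []   -- Pre_ guarantees the key exists
  let types := requests.map (fun r => pvGetD r "type" "")
  let has_asset := types.any (fun ct => pvAssetTuple.any (fun a => PySem.Str.startswith ct a))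
  let has_non_asset := types.any (fun ct => pvNonAssetTuple.any (fun n => PySem.Str.startswith ct n))
  has_asset && !has_non_asset

-- ===== PRECONDITION & SPEC =====
-- Pre_ excludes only sessions without a 'requests' key, where A raises KeyError (and so does B).
def Pre_is_asset_only_session (session : List (String × List (List (String × String)))) : Prop :=
  "requests" ∈ session.map Prod.fst

instance (session : List (String × List (List (String × String)))) : Decidable (Pre_is_asset_only_session session) := by
  unfold Pre_is_asset_only_session; infer_instance

def pvWitness_is_asset_only_session : (List (String × List (List (String × String)))) :=
  [("requests", [[("type", "image/png")]])]

def Spec_is_asset_only_session (session : List (String × List (List (String × String)))) (out : Bool) : Prop := out = is_asset_only_session_alt session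
instance (session : List (String × List (List (String × String)))) (out : Bool) : Decidable (Spec_is_asset_only_session session out) := by unfold Spec_is_asset_only_session; infer_instance

-- ===== CLAIM (what is proved, stated in full; the proofs are below) =====
def Claim_equal_is_asset_only_session : Prop := ∀ (session : List (String × List (List (String × String)))), Dom_is_asset_only_session session → Pre_is_asset_only_session session → Spec_is_asset_only_session session (is_asset_only_session session)

-- ===== LEMMAS AND PROOFS =====

-- two prefixes of the same list are comparable; incomparable strings cannot both be prefixes
theorem pv_not_both_prefix {p q l : List Char} (hp : p <+: l) (hq : q <+: l)
    (h1 : ¬ (p <+: q)) (h2 : ¬ (q <+: p)) : False := by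
  rcases le_total p.length q.length with hle | hle
  · exact h1 (List.prefix_of_prefix_length_le hp hq hle)
  · exact h2 (List.prefix_of_prefix_length_le hq hp hle)

-- disjointness: a type matching an asset prefix matches no non-asset prefix
theorem pv_asset_not_non (ct : String)
    (h : pvAssetSet.any (fun asset => PySem.Str.startswith ct asset) = true) :
    pvNonAssetSet.any (fun nt => PySem.Str.startswith ct nt) = false := by
  have e1 : pvAssetSet = ["image/", "text/css", "application/javascript"] := by decide
  have e2 : pvNonAssetSet = ["text/html", "application/json"] := by decide
  rw [Bool.eq_false_iff]
  intro hn
  rw [List.any_eq_true] at h hn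
  obtain ⟨p, hp, hps⟩ := h
  obtain ⟨q, hq, hqs⟩ := hn
  rw [e1] at hp
  rw [e2] at hq
  simp only [PySem.Str.startswith_eq, PySem.Chars.startswith_iff] at hps hqs
  fin_cases hp <;> fin_cases hq <;>
    exact pv_not_both_prefix hps hqs (by decide) (by decide)

-- A's loop equals B's formula, for any accumulator value
theorem pv_loop_eq (reqs : List (List (String × String))) (seen : Bool) :
    pvALoop reqs seen =
      ((seen || (reqs.map (fun r => pvGetD r "type" "")).any
          (fun ct => pvAssetTuple.any (fun a => PySem.Str.startswith ct a))) &&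
       !((reqs.map (fun r => pvGetD r "type" "")).any
          (fun ct => pvNonAssetTuple.any (fun n => PySem.Str.startswith ct n)))) := by
  induction reqs generalizing seen with
  | nil => simp [pvALoop]
  | cons r rest ih =>
    have hs : pvAssetSet = pvAssetTuple := by decide
    have hs' : pvNonAssetSet = pvNonAssetTuple := by decide
    by_cases ha : pvAssetSet.any (fun asset => PySem.Str.startswith (pvGetD r "type" "") asset) = true
    · have hn := pv_asset_not_non _ ha
      rw [show pvALoop (r :: rest) seen = pvALoop rest true from by
            simp only [pvALoop]; rw [if_pos ha]]
      rw [ih, List.map_cons, List.any_cons, List.any_cons, ← hs, ← hs', ha, hn]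
      simp
    · by_cases hn : pvNonAssetSet.any (fun nt => PySem.Str.startswith (pvGetD r "type" "") nt) = true
      · rw [show pvALoop (r :: rest) seen = false from by
              simp only [pvALoop]; rw [if_neg ha, if_pos hn]]
        rw [List.map_cons, List.any_cons, List.any_cons, ← hs', hn]
        simp
      · rw [show pvALoop (r :: rest) seen = pvALoop rest seen from by
              simp only [pvALoop]; rw [if_neg ha, if_neg hn]]
        rw [ih, List.map_cons, List.any_cons, List.any_cons, ← hs, ← hs']
        simp only [Bool.not_eq_true] at ha hn
        rw [ha, hn]
        simp

-- ===== VERDICT (by name: the statement is the Claim_ definition above) =====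
theorem is_asset_only_session_spec : Claim_equal_is_asset_only_session := by
  intro session _ _
  unfold Spec_is_asset_only_session is_asset_only_session is_asset_only_session_alt
  rw [pv_loop_eq]
  simp
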